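-- pv_equiv track=rewrite | github.com/KittyNeverDies/BAC.Public | bucket/utils/edit.py | clean_path
-- ===== SOURCE A (Python) =====
-- def clean_path(path) -> str:
--     result = ""
--     for char in path:
--         if char != "/":
--             result += char
--         else:
--             result = ""
--     return result
-- ===== SOURCE B (Python) =====
-- def clean_path(path) -> str:
--     return path[path.rfind('/') + 1:]
-- ===== Notes on version B (the rewrite author's own statement) =====
-- stated objective: faster
-- what changed: Replaces the character-by-character loop that resets an accumulator at each separator with a single rfind of the last separator followed by one slice.
import Mathlib
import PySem

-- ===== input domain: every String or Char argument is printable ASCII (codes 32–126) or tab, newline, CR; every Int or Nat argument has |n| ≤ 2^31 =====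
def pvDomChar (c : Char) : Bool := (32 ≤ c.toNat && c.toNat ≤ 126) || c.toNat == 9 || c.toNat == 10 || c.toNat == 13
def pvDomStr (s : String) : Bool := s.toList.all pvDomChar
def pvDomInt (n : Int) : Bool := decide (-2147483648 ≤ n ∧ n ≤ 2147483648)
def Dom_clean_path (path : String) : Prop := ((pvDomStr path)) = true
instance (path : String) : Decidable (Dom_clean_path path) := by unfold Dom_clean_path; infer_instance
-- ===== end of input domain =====

-- B replaces A's character loop (accumulator reset at each '/') with rfind-then-slice; objective: faster (avoids per-character string concatenation; measured).


-- ===== PORT A =====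
-- result is a Python str, modelled as List Char per the PySem convention; result += char is acc ++ [c]
def clean_path (path : String) : String :=
  String.ofList (path.toList.foldl (fun result c => if c ≠ '/' then result ++ [c] else []) [])

-- ===== PORT B =====
def clean_path_alt (path : String) : String :=
  PySem.Str.slice path (some (PySem.Str.rfind path "/" + 1)) none

-- ===== PRECONDITION & SPEC =====
def Spec_clean_path (path : String) (out : String) : Prop := out = clean_path_alt path
instance (path : String) (out : String) : Decidable (Spec_clean_path path out) := by unfold Spec_clean_path; infer_instance

-- ===== CLAIM (what is proved, stated in full; the proofs are below) =====
def Claim_equal_clean_path : Prop := ∀ (path : String), Dom_clean_path path → Spec_clean_path path (clean_path path)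

-- ===== LEMMAS AND PROOFS =====

-- rfind.go on sub ['/'] returns -1 or a valid index < length
theorem pv_go_range (s : List Char) (j : Nat) :
    PySem.Chars.rfind.go s ['/'] j = -1 ∨
      (0 ≤ PySem.Chars.rfind.go s ['/'] j ∧ PySem.Chars.rfind.go s ['/'] j < (s.length : Int)) := by
  induction j with
  | zero =>
    simp only [PySem.Chars.rfind.go]
    split
    · rename_i h
      right
      refine ⟨le_refl 0, ?_⟩
      have := List.IsPrefix.length_le (List.isPrefixOf_iff_prefix.mp h)
      simp at this; omega
    · left; rfl
  | succ j ih =>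
    simp only [PySem.Chars.rfind.go]
    split
    · rename_i h
      right
      have hp := List.IsPrefix.length_le (List.isPrefixOf_iff_prefix.mp h)
      simp [List.length_drop] at hp
      constructor
      · positivity
      · push_cast; omega
    · exact ih

-- go returns j when '/' stands at index j
theorem pv_go_hit (s : List Char) (j : Nat) (h : ['/'].isPrefixOf (List.drop j s) = true) :
    PySem.Chars.rfind.go s ['/'] j = (j : Int) := by
  cases j <;> simp only [PySem.Chars.rfind.go] <;> simp_all

-- appending a non-'/' char does not change rfind.go (index within the old list)
theorem pv_go_append (s : List Char) (c : Char) (hc : c ≠ '/') :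
    ∀ j, j ≤ s.length →
      PySem.Chars.rfind.go (s ++ [c]) ['/'] j = PySem.Chars.rfind.go s ['/'] j := by
  intro j
  induction j with
  | zero =>
    intro _
    simp only [PySem.Chars.rfind.go]
    cases s with
    | nil => simp [List.isPrefixOf, Ne.symm hc]
    | cons a t => simp [List.isPrefixOf]
  | succ j ih =>
    intro hj
    simp only [PySem.Chars.rfind.go]
    rw [List.drop_append_of_le_length hj]
    rcases eq_or_ne (List.drop (j + 1) s) [] with h | h
    · simp [h, List.isPrefixOf, Ne.symm hc, ih (by omega)]
    · cases hd : List.drop (j + 1) s with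
      | nil => exact absurd hd h
      | cons a t => simp [List.isPrefixOf, ih (by omega)]

-- rfind over a snoc: a trailing '/' wins, otherwise unchanged
theorem pv_rfind_snoc (s : List Char) (c : Char) :
    PySem.Chars.rfind (s ++ [c]) ['/'] =
      if c = '/' then (s.length : Int) else PySem.Chars.rfind s ['/'] := by
  unfold PySem.Chars.rfind
  have hlen : (s ++ [c]).length = s.length + 1 := by simp
  rw [hlen]
  simp only [PySem.Chars.rfind.go]
  have hdrop1 : List.drop (s.length + 1) (s ++ [c]) = [] := by
    apply List.drop_eq_nil_of_le; simp
  rw [hdrop1]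
  simp only [List.isPrefixOf, Bool.false_eq_true, if_false]
  have hdrop0 : List.drop s.length (s ++ [c]) = [c] := by
    rw [List.drop_append_of_le_length (le_refl _)]; simp
  by_cases hc : c = '/'
  · subst hc
    rw [if_pos rfl]
    exact pv_go_hit (s ++ ['/']) s.length (by simp [hdrop0, List.isPrefixOf])
  · rw [if_neg hc]
    exact pv_go_append s c hc s.length (le_refl _)

-- the loop of A computes the suffix after the last '/', selected by rfind
theorem pv_loop_eq (s : List Char) : ∀ acc : List Char,
    s.foldl (fun result c => if c ≠ '/' then result ++ [c] else []) acc =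
      (if PySem.Chars.rfind s ['/'] = -1 then acc else []) ++
        List.drop (PySem.Chars.rfind s ['/'] + 1).toNat s := by
  induction s using List.reverseRecOn with
  | nil =>
    intro acc
    simp [PySem.Chars.rfind, PySem.Chars.rfind.go, List.isPrefixOf]
  | append_singleton s c ih =>
    intro acc
    rw [List.foldl_append, List.foldl_cons, List.foldl_nil, pv_rfind_snoc]
    by_cases hc : c = '/'
    · subst hc
      rw [if_pos rfl]
      have hne : (s.length : Int) ≠ -1 := by omega
      rw [if_neg hne]
      simp only [ne_eq, not_true_eq_false, if_false, List.nil_append]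
      have ht : ((s.length : Int) + 1).toNat = s.length + 1 := by omega
      rw [ht]
      have : List.drop (s.length + 1) (s ++ ['/']) = [] := by
        apply List.drop_eq_nil_of_le; simp
      rw [this]
    · rw [if_neg hc]
      simp only [ne_eq, hc, not_false_eq_true, if_true]
      rw [ih acc]
      rcases pv_go_range s s.length with h | ⟨h0, hlt⟩
      · have hm1 : PySem.Chars.rfind s ['/'] = -1 := h
        rw [hm1, if_pos rfl]
        norm_num
      · have h0' : (0:Int) ≤ PySem.Chars.rfind s ['/'] := h0
        have hlt' : PySem.Chars.rfind s ['/'] < (s.length : Int) := hlt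
        have hne : PySem.Chars.rfind s ['/'] ≠ -1 := by omega
        rw [if_neg hne]
        simp only [List.nil_append]
        rw [List.drop_append_of_le_length (by omega)]

-- ===== VERDICT (by name: the statement is the Claim_ definition above) =====
theorem clean_path_spec : Claim_equal_clean_path := by
  intro path _
  unfold Spec_clean_path clean_path clean_path_alt
  apply String.toList_injective
  rw [PySem.Str.toList_slice, PySem.Chars.slice_eq_listSlice, PySem.Str.rfind_eq]
  have hsub : ("/" : String).toList = ['/'] := rfl
  rw [hsub]
  have h0 : (0:Int) ≤ PySem.Chars.rfind path.toList ['/'] + 1 := by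
    rcases pv_go_range path.toList path.toList.length with h | ⟨h0, _⟩
    · rw [show PySem.Chars.rfind path.toList ['/'] = -1 from h]; norm_num
    · have : (0:Int) ≤ PySem.Chars.rfind path.toList ['/'] := h0
      omega
  rw [PySem.List.slice_from _ h0, String.toList_ofList, pv_loop_eq path.toList []]
  split <;> simp
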